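-- pv_equiv track=rewrite | github.com/UltraJack68/Giacomo-Salvatore-Portfolio | Longest Subsequence With Limited Sum.py | answerQueries
-- ===== SOURCE A (Python) =====
-- from typing import List
--
-- def answerQueries(nums: List[int], queries: List[int]) -> List[int]:
--
--     #subsequence (gives choice for any subset of elements) != subarray (doesn't)
--
--     nums.sort()
--     ans = []
--
--     for query in queries:
--         count = 0
--
--         for num in nums:
--             if query >= num:
--                 query -= num
--                 count += 1
--             else:
--                 break
--         ans.append(count)
--
--     return ans
-- ===== SOURCE B (Python) =====
-- from typing import List
--
-- def answerQueries(nums: List[int], queries: List[int]) -> List[int]: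
--     nums.sort()
--     # running maximum of prefix sums: monotone, so each query is a binary search
--     m = []
--     run = 0
--     best = None
--     for x in nums:
--         run += x
--         if best is None or run > best:
--             best = run
--         m.append(best)
--     ans = []
--     for q in queries:
--         lo, hi = 0, len(m)
--         while lo < hi:
--             mid = (lo + hi) // 2
--             if m[mid] <= q:
--                 lo = mid + 1
--             else:
--                 hi = mid
--         ans.append(lo)
--     return ans
-- ===== Notes on version B (the rewrite author's own statement) =====
-- stated objective: faster
-- what changed: Replaces the per-query greedy rescan of the sorted list (O(N) each) by a once-built running-maximum-of-prefix-sums array, which is monotone even with negative numbers, plus a binary search per query.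
import Mathlib
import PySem

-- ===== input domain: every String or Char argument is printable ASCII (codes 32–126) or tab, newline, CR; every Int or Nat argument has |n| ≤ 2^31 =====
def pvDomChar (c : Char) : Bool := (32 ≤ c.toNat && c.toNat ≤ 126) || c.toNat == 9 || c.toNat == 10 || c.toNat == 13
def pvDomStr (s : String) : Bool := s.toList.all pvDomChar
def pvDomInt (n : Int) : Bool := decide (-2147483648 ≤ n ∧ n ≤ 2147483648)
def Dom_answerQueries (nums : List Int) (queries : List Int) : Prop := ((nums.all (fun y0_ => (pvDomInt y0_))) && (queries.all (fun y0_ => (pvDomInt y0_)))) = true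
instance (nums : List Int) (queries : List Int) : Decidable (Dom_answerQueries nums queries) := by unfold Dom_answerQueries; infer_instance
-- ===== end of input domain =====

-- B replaces A's per-query greedy scan of the sorted list by a once-built running-maximum-of-prefix-sums
-- array plus a binary search per query; both sort nums in place, and the claim is about the return value.

-- ===== PORT A =====
-- inner 'for num in nums: if query >= num: … else: break' with (query, count) state
def aLoop : List Int → Int → Int → Int
  | [], _, count => count
  | num :: rest, query, count =>
      if query ≥ num then aLoop rest (query - num) (count + 1) else count

def answerQueries (nums : List Int) (queries : List Int) : List Int :=
  let s := PySem.List.sorted nums (fun x => x) false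
  queries.foldl (fun ans query => ans ++ [aLoop s query 0]) []

-- ===== PORT B =====
-- 'for x in nums: run += x; if best is None or run > best: best = run; m.append(best)' with (run, best) state
def buildM : List Int → Int → Option Int → List Int
  | [], _, _ => []
  | x :: rest, run, none => (run + x) :: buildM rest (run + x) (some (run + x))
  | x :: rest, run, some b =>
      (if run + x > b then run + x else b) ::
        buildM rest (run + x) (some (if run + x > b then run + x else b))

-- the 'while lo < hi' binary search; m[mid] is always in range (lo ≤ mid < hi ≤ len m), ported via getD
def bsearch (m : List Int) (q : Int) (lo hi : Nat) : Nat :=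
  if _h : lo < hi then
    if m.getD ((lo + hi) / 2) 0 ≤ q then bsearch m q ((lo + hi) / 2 + 1) hi
    else bsearch m q lo ((lo + hi) / 2)
  else lo
termination_by hi - lo
decreasing_by all_goals omega

def answerQueries_alt (nums : List Int) (queries : List Int) : List Int :=
  let s := PySem.List.sorted nums (fun x => x) false
  let m := buildM s 0 none
  queries.foldl (fun ans q => ans ++ [(bsearch m q 0 m.length : Int)]) []

-- ===== PRECONDITION & SPEC =====
def Spec_answerQueries (nums : List Int) (queries : List Int) (out : List Int) : Prop := out = answerQueries_alt nums queries
instance (nums : List Int) (queries : List Int) (out : List Int) : Decidable (Spec_answerQueries nums queries out) := by unfold Spec_answerQueries; infer_instance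

-- ===== CLAIM (what is proved, stated in full; the proofs are below) =====
def Claim_equal_answerQueries : Prop := ∀ (nums : List Int) (queries : List Int), Dom_answerQueries nums queries → Spec_answerQueries nums queries (answerQueries nums queries)

-- ===== LEMMAS AND PROOFS =====

-- number of leading elements of m that are ≤ q
def cntLe (m : List Int) (q : Int) : Nat := (m.takeWhile (fun v => decide (v ≤ q))).length

-- A's greedy count equals the takeWhile length on the running-max list
theorem aLoop_eq_cnt (s : List Int) (q run b c : Int) (hb : b ≤ q + run) :
    aLoop s q c = c + (cntLe (buildM s run (some b)) (q + run) : Int) := by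
  induction s generalizing q run b c with
  | nil => simp [aLoop, buildM, cntLe]
  | cons x rest ih =>
    simp only [aLoop, buildM, cntLe]
    set B := if run + x > b then run + x else b with hB
    have hBx : run + x ≤ B := by rw [hB]; split <;> omega
    by_cases hq : q ≥ x
    · have hBle : B ≤ q + run := by rw [hB]; split <;> omega
      rw [if_pos hq, List.takeWhile_cons_of_pos (by simpa using hBle)]
      rw [ih (q - x) (run + x) B (c + 1) (by omega)]
      have he : q - x + (run + x) = q + run := by ring
      rw [he]
      simp only [List.length_cons, cntLe]
      push_cast; ring
    · rw [if_neg hq, List.takeWhile_cons_of_neg (by simpa using (show ¬ B ≤ q + run by omega))]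
      simp

theorem aLoop_eq_cnt0 (s : List Int) (q : Int) :
    aLoop s q 0 = (cntLe (buildM s 0 none) q : Int) := by
  cases s with
  | nil => simp [aLoop, buildM, cntLe]
  | cons x rest =>
    simp only [aLoop, buildM, cntLe]
    by_cases hq : q ≥ x
    · have hx : (0 : Int) + x ≤ q := by omega
      rw [if_pos hq, List.takeWhile_cons_of_pos (by simpa using hx)]
      rw [aLoop_eq_cnt rest (q - x) (0 + x) (0 + x) (0 + 1) (by omega)]
      have he : q - x + (0 + x) = q := by ring
      rw [he]
      simp only [List.length_cons, cntLe]
      push_cast; ring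
    · rw [if_neg hq, List.takeWhile_cons_of_neg (by simpa using (show ¬ (0 : Int) + x ≤ q by omega))]
      simp

-- every element of buildM … (some b) is ≥ b
theorem buildM_ge (s : List Int) (run b : Int) :
    ∀ y ∈ buildM s run (some b), b ≤ y := by
  induction s generalizing run b with
  | nil => simp [buildM]
  | cons x rest ih =>
    intro y hy
    simp only [buildM, List.mem_cons] at hy
    rcases hy with h | h
    · subst h; split <;> omega
    · have h1 := ih (run + x) (if run + x > b then run + x else b) y h
      have : b ≤ (if run + x > b then run + x else b) := by split <;> omega
      omega

theorem buildM_pairwise_some (s : List Int) (run b : Int) :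
    List.Pairwise (· ≤ ·) (buildM s run (some b)) := by
  induction s generalizing run b with
  | nil => simp [buildM]
  | cons x rest ih =>
    simp only [buildM]
    exact List.pairwise_cons.mpr ⟨buildM_ge _ _ _, ih _ _⟩

theorem buildM_pairwise (s : List Int) : List.Pairwise (· ≤ ·) (buildM s 0 none) := by
  cases s with
  | nil => simp [buildM]
  | cons x rest =>
    simp only [buildM]
    exact List.pairwise_cons.mpr ⟨buildM_ge _ _ _, buildM_pairwise_some _ _ _⟩

theorem cntLe_le_length (m : List Int) (q : Int) : cntLe m q ≤ m.length :=
  (List.takeWhile_sublist _).length_le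

theorem getD_lt_cnt (m : List Int) (q : Int) (i : Nat) (hi : i < cntLe m q) :
    m.getD i 0 ≤ q := by
  induction m generalizing i with
  | nil => simp [cntLe] at hi
  | cons x rest ih =>
    by_cases hx : x ≤ q
    · rw [cntLe, List.takeWhile_cons_of_pos (by simpa using hx), List.length_cons] at hi
      cases i with
      | zero => simpa using hx
      | succ j =>
        rw [List.getD_cons_succ]
        exact ih j (by rw [cntLe]; omega)
    · rw [cntLe, List.takeWhile_cons_of_neg (by simpa using hx)] at hi
      simp at hi

theorem getD_ge_cnt (m : List Int) (q : Int) (hm : List.Pairwise (· ≤ ·) m)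
    (i : Nat) (hge : cntLe m q ≤ i) (hlen : i < m.length) :
    ¬ m.getD i 0 ≤ q := by
  induction m generalizing i with
  | nil => simp at hlen
  | cons x rest ih =>
    by_cases hx : x ≤ q
    · rw [cntLe, List.takeWhile_cons_of_pos (by simpa using hx), List.length_cons] at hge
      cases i with
      | zero => omega
      | succ j =>
        rw [List.getD_cons_succ]
        exact ih hm.of_cons j (by rw [cntLe]; omega) (by simpa using Nat.lt_of_succ_lt_succ hlen)
    · cases i with
      | zero => simpa using hx
      | succ j =>
        rw [List.getD_cons_succ]
        intro hle
        have hjl : j < rest.length := by simpa using Nat.lt_of_succ_lt_succ hlen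
        have hmem : rest.getD j 0 ∈ rest := by
          rw [List.getD_eq_getElem _ _ hjl]; exact List.getElem_mem hjl
        have := (List.pairwise_cons.mp hm).1 _ hmem
        exact hx (le_trans this hle)

-- binary-search correctness on a monotone list
theorem bsearch_eq (m : List Int) (q : Int) (hm : List.Pairwise (· ≤ ·) m) :
    ∀ lo hi, lo ≤ cntLe m q → cntLe m q ≤ hi → hi ≤ m.length →
    bsearch m q lo hi = cntLe m q := by
  intro lo hi
  induction hn : hi - lo using Nat.strong_induction_on generalizing lo hi with
  | _ n ih =>
    intro hlo hhi hlen
    rw [bsearch]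
    split
    · rename_i h
      split
      · rename_i hle
        have : (lo + hi) / 2 < cntLe m q := by
          by_contra hc
          exact getD_ge_cnt m q hm _ (by omega) (by omega) hle
        exact ih (hi - ((lo + hi) / 2 + 1)) (by omega) _ _ rfl (by omega) hhi hlen
      · rename_i hgt
        have : cntLe m q ≤ (lo + hi) / 2 := by
          by_contra hc
          exact hgt (getD_lt_cnt m q _ (by omega))
        exact ih ((lo + hi) / 2 - lo) (by omega) _ _ rfl hlo this
          (le_trans (by omega) hlen)
    · omega

-- pointwise equality of the two per-query functions
theorem perQuery_eq (s : List Int) (q : Int) :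
    aLoop s q 0 = ((bsearch (buildM s 0 none) q 0 (buildM s 0 none).length : Nat) : Int) := by
  rw [bsearch_eq _ _ (buildM_pairwise s) 0 _ (Nat.zero_le _) (cntLe_le_length _ _) le_rfl]
  exact aLoop_eq_cnt0 s q

theorem foldl_map_eq {α : Type} (f g : Int → α) (h : ∀ q, f q = g q) :
    ∀ (qs : List Int) (ans : List α),
    qs.foldl (fun a q => a ++ [f q]) ans = qs.foldl (fun a q => a ++ [g q]) ans := by
  intro qs ans
  have hf : (fun (a : List α) q => a ++ [f q]) = (fun a q => a ++ [g q]) := by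
    funext a q; rw [h]
  rw [hf]

-- ===== VERDICT (by name: the statement is the Claim_ definition above) =====
theorem answerQueries_spec : Claim_equal_answerQueries := by
  intro nums queries _
  unfold Spec_answerQueries answerQueries answerQueries_alt
  exact foldl_map_eq _ _
    (fun q => perQuery_eq (PySem.List.sorted nums (fun x => x) false) q) queries []
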